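-- pv_equiv track=rewrite | github.com/Maerig/advent_of_code_2017 | day9/main.py | part_1
-- ===== SOURCE A (Python) =====
-- def part_1(chars):
--     skip = False
--     is_garbage = False
--     group_depth = 0
--     total_score = 0
--
--     for c in chars:
--         if skip:
--             skip = False
--             continue
--         if c == '!':
--             skip = True
--             continue
--         if is_garbage:
--             if c == '>':
--                 is_garbage = False
--             else:
--                 continue
--         elif c == '<':
--             is_garbage = True
--         elif c == '{':
--             group_depth += 1
--         elif c == '}' and group_depth:
--             total_score += group_depth
--             group_depth -= 1
--
--     return total_score
-- ===== SOURCE B (Python) =====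
-- import re
--
--
-- def part_1(chars):
--     s = ''.join(chars)
--     # stage 1: remove escape pairs '!x' everywhere (DOTALL so '!\n' is removed too)
--     s = re.sub(r'!.', '', s, flags=re.S)
--     # stage 2: remove garbage '<...>' (an unterminated '<' swallows the rest)
--     s = re.sub(r'<[^>]*>?', '', s, flags=re.S)
--     total = 0
--     depth = 0
--     for c in s:
--         if c == '{':
--             depth += 1
--         elif c == '}' and depth:
--             total += depth
--             depth -= 1
--     return total
-- ===== Notes on version B (the rewrite author's own statement) =====
-- stated objective: simpler
-- what changed: Replaced the interleaved four-variable state machine by three independent passes: a regex pass stripping escape pairs, a regex pass stripping garbage, and a plain depth-counting loop over the remaining braces.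
import Mathlib
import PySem

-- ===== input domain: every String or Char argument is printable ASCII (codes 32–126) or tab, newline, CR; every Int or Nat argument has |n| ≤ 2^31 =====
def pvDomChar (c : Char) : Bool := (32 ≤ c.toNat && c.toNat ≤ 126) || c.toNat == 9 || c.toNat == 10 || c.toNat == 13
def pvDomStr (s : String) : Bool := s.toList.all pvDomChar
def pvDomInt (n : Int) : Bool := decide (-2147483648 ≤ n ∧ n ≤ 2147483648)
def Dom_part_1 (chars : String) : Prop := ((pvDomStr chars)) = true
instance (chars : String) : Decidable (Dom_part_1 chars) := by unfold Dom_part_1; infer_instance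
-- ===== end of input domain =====

-- B replaces A's interleaved state machine by three passes (strip escapes, strip garbage, count braces); same result, simpler structure.


-- ===== PORT A =====
-- A's single loop, with the four state variables (skip, is_garbage, group_depth, total_score)
def part1Loop : List Char → Bool → Bool → Int → Int → Int
  | [], _, _, _, t => t
  | c :: rest, skip, garb, d, t =>
    if skip then part1Loop rest false garb d t
    else if c = '!' then part1Loop rest true garb d t
    else if garb then
      (if c = '>' then part1Loop rest false false d t else part1Loop rest false true d t)
    else if c = '<' then part1Loop rest false true d t
    else if c = '{' then part1Loop rest false garb (d + 1) t
    else if c = '}' ∧ d ≠ 0 then part1Loop rest false garb (d - 1) (t + d)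
    else part1Loop rest false garb d t

def part_1 (chars : String) : Int := part1Loop chars.toList false false 0 0

-- ===== PORT B =====
-- stage 1: re.sub(r'!.', '', s, flags=re.S): drop each '!' together with the following char
-- (a trailing lone '!' does not match the pattern and stays); exact hand port of the regex.
def stripEsc : List Char → List Char
  | [] => []
  | [c] => [c]
  | c :: c2 :: rest => if c = '!' then stripEsc rest else c :: stripEsc (c2 :: rest)

-- stage 2: re.sub(r'<[^>]*>?', '', s, flags=re.S): drop '<' up to and including the next '>'
-- (or to the end of the string); exact hand port of the regex, flag = inside a garbage match.
def stripGar : Bool → List Char → List Char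
  | _, [] => []
  | true, c :: rest => if c = '>' then stripGar false rest else stripGar true rest
  | false, c :: rest => if c = '<' then stripGar true rest else c :: stripGar false rest

-- stage 3: the brace-counting loop (depth, total)
def countBraces : List Char → Int → Int → Int
  | [], _, t => t
  | c :: rest, d, t =>
    if c = '{' then countBraces rest (d + 1) t
    else if c = '}' ∧ d ≠ 0 then countBraces rest (d - 1) (t + d)
    else countBraces rest d t

def part_1_alt (chars : String) : Int :=
  countBraces (stripGar false (stripEsc chars.toList)) 0 0

-- ===== PRECONDITION & SPEC =====
def Spec_part_1 (chars : String) (out : Int) : Prop := out = part_1_alt chars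
instance (chars : String) (out : Int) : Decidable (Spec_part_1 chars out) := by unfold Spec_part_1; infer_instance

-- ===== CLAIM (what is proved, stated in full; the proofs are below) =====
def Claim_equal_part_1 : Prop := ∀ (chars : String), Dom_part_1 chars → Spec_part_1 chars (part_1 chars)

-- ===== LEMMAS AND PROOFS =====

-- one-step unfolding lemmas for A's loop (so the proof rewrites exactly one step at a time)
theorem part1Loop_cons_false (c : Char) (l : List Char) (garb : Bool) (d t : Int) :
    part1Loop (c :: l) false garb d t =
      (if c = '!' then part1Loop l true garb d t
       else if garb then (if c = '>' then part1Loop l false false d t else part1Loop l false true d t)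
       else if c = '<' then part1Loop l false true d t
       else if c = '{' then part1Loop l false garb (d + 1) t
       else if c = '}' ∧ d ≠ 0 then part1Loop l false garb (d - 1) (t + d)
       else part1Loop l false garb d t) := by
  rw [part1Loop]; simp

theorem part1Loop_skip (c : Char) (l : List Char) (garb : Bool) (d t : Int) :
    part1Loop (c :: l) true garb d t = part1Loop l false garb d t := by
  rw [part1Loop]; simp

-- Main invariant: A's loop (with skip = false) equals counting braces of the staged-filtered rest,
-- where the garbage flag of stage 2 matches A's is_garbage state.
theorem part1Loop_eq_staged : ∀ (l : List Char) (garb : Bool) (d t : Int),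
    part1Loop l false garb d t = countBraces (stripGar garb (stripEsc l)) d t := by
  intro l
  induction l using stripEsc.induct with
  | case1 =>
    intro garb d t
    simp [part1Loop, stripEsc, stripGar, countBraces]
  | case2 c =>
    intro garb d t
    by_cases hb : c = '!'
    · subst hb; cases garb <;> simp [part1Loop, stripEsc, stripGar, countBraces]
    · cases garb <;>
        simp only [part1Loop, stripEsc, stripGar, if_neg hb] <;>
        split_ifs <;> simp_all [countBraces]
  | case3 c2 rest ih =>
    intro garb d t
    rw [part1Loop_cons_false, if_pos rfl, part1Loop_skip, ih,
      show stripEsc ('!' :: c2 :: rest) = stripEsc rest from by rw [stripEsc]; simp]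
  | case4 c c2 rest hb ih =>
    intro garb d t
    rw [part1Loop_cons_false, if_neg hb,
      show stripEsc (c :: c2 :: rest) = c :: stripEsc (c2 :: rest) from by
        rw [stripEsc]; simp [hb]]
    cases garb with
    | true =>
      by_cases h : c = '>' <;> simp [stripGar, h, ih]
    | false =>
      by_cases h1 : c = '<'
      · simp [stripGar, h1, ih]
      · by_cases h2 : c = '{'
        · simp [stripGar, countBraces, h2, ih]
        · by_cases h3 : c = '}' ∧ d ≠ 0 <;>
            simp [stripGar, countBraces, h1, h2, h3, ih]

-- ===== VERDICT (by name: the statement is the Claim_ definition above) =====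
theorem part_1_spec : Claim_equal_part_1 := by
  intro chars _
  unfold Spec_part_1 part_1 part_1_alt
  exact part1Loop_eq_staged chars.toList false 0 0
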